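-- pv_equiv track=rewrite | github.com/Mahendra2238/DSA_Training | DSA sheet practice/codes (python)/10_Tries.py | displayContacts
-- ===== SOURCE A (Python) =====
-- def displayContacts(n, contact, s):
--     root=Tnode()
--     def insert(word):
--         node=root
--         for ch in word:
--             if ch not in node.data:
--                 node.data[ch]=Tnode()   # create trie node
--             node=node.data[ch]
--         node.end=True                  # mark end of word
--     for c in contact:
--         insert(c)                      # build trie
--     def collect(node,prefix,res):
--         if node.end:
--             res.append(prefix)         # valid contact
--         for ch in node.data:
--             collect(node.data[ch],prefix+ch,res)
--     ans=[];prefix="";node=root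
--     for ch in s:
--         prefix+=ch
--         if node and ch in node.data:
--             node=node.data[ch]         # move in trie
--             res=[]
--             collect(node,prefix,res)   # collect matches
--             ans.append(sorted(res))    # store result
--         else:
--             node=None
--             ans.append(["0"])          # no match
--     return ans
--
-- class Tnode:
--     def __init__(self):
--         self.data={}     # children
--         self.end=False   # end of word
-- ===== SOURCE B (Python) =====
-- def displayContacts(n, contact, s):
--     # Sort the distinct contacts once; per character narrow the current
--     # candidate list by its next character only (no trie, no per-prefix sort,
--     # no re-check of the whole prefix: output order falls out of the one sort).
--     cand = sorted(set(contact))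
--     ans = []
--     i = 0
--     for ch in s:
--         cand = [w for w in cand if len(w) > i and w[i] == ch]
--         i += 1
--         ans.append(cand if cand else ["0"])
--     return ans
-- ===== Notes on version B (the rewrite author's own statement) =====
-- stated objective: simpler
-- what changed: Replaces the trie build plus per-prefix DFS-collect-and-sort with one sort of the distinct contacts and a per-character narrowing filter of the current candidate list (output order falls out of the single sort).
import Mathlib
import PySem

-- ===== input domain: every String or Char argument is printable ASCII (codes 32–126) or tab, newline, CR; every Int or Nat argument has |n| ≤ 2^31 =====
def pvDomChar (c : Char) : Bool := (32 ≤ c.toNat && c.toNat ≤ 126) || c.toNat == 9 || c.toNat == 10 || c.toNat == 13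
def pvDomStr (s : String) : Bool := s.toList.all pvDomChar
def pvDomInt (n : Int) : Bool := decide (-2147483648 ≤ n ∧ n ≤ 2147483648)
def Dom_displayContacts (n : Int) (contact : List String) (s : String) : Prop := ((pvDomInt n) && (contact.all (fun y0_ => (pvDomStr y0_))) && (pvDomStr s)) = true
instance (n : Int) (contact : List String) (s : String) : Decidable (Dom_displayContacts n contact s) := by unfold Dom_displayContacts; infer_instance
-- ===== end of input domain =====

-- B replaces A's trie build + per-prefix DFS-collect-and-sort by sorting the distinct
-- contacts once and filtering the sorted list per prefix (return value only; A mutates nothing).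

-- ===== PORT A =====
-- A's nested `Tnode` dicts are encoded FLAT (a nested inductive is not allowed here):
-- one dict entry per trie node, keyed by the node's path from the root; the value is the
-- node's `end` flag.  This is exact: `ch in node.data` at path p is `contains (p ++ [ch])`,
-- and the children of p, in `node.data` insertion order, are the keys of length |p|+1
-- extending p, in dict insertion order (a child's first creation inserts its flat key).
-- Strings are handled as char lists (exact; String.ofList at the end).

-- Python's `sorted` on lists of strings (strings as char lists, lexicographic
-- code-point order = Lean's linear order on `List Char`); used by both ports.
def pySortedLists (xs : List (List Char)) : List (List Char) :=
  @PySem.List.sorted (List Char) (List Char) List.instLinearOrder.toLT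
    LinearOrder.toDecidableLT xs (fun x => x) false

def trieStep (tp : PySem.Dict (List Char) Bool × List Char) (ch : Char) :
    PySem.Dict (List Char) Bool × List Char :=
  let p' := tp.2 ++ [ch]
  ((if tp.1.contains p' then tp.1 else tp.1.insert p' false), p')

-- `insert(word)`: walk down creating missing nodes, then mark the end node.
def trieInsert (t : PySem.Dict (List Char) Bool) (w : List Char) :
    PySem.Dict (List Char) Bool :=
  let r := w.foldl trieStep (t, [])
  r.1.insert r.2 true

def trieBuild (cs : List (List Char)) : PySem.Dict (List Char) Bool :=
  cs.foldl trieInsert ((PySem.Dict.empty).insert [] false)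

-- the children of node p, as their flat paths, in `node.data` insertion order
def childPaths (t : PySem.Dict (List Char) Bool) (p : List Char) : List (List Char) :=
  t.keys.filter (fun k => decide (k.length = p.length + 1) && p.isPrefixOf k)

-- `collect(node, prefix, res)`; recursion depth is < number of trie nodes, so the
-- fuel `t.size + 1` passed below never runs out (proved in the lemmas).
def trieCollect (t : PySem.Dict (List Char) Bool) :
    Nat → List Char → List Char → List (List Char) → List (List Char)
  | 0, _, _, res => res
  | fuel + 1, p, pref, res =>
    let res := if t.getD p false then res ++ [pref] else res
    (childPaths t p).foldl
      (fun r k => trieCollect t fuel k (pref ++ [k.getLastD ' ']) r) res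

def stepA (t : PySem.Dict (List Char) Bool) (fuel : Nat)
    (st : List (List String) × List Char × Option (List Char)) (ch : Char) :
    List (List String) × List Char × Option (List Char) :=
  let pref := st.2.1 ++ [ch]
  match st.2.2 with
  | some p =>
    if t.contains (p ++ [ch]) then
      let res := trieCollect t fuel (p ++ [ch]) pref []
      (st.1 ++ [(pySortedLists res).map String.ofList], pref, some (p ++ [ch]))
    else (st.1 ++ [["0"]], pref, none)
  | none => (st.1 ++ [["0"]], pref, none)

def displayContacts (n : Int) (contact : List String) (s : String) :
    List (List String) :=
  let t := trieBuild (contact.map String.toList)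
  (s.toList.foldl (stepA t (t.size + 1)) ([], [], some [])).1

-- ===== PORT B =====
-- Source B: `cand = sorted(set(contact))`, then per character narrow `cand` by its
-- character at position i (`len(w) > i and w[i] == ch`; i the prefix length so far).
-- Strings handled as char lists (exact on this domain; w[i] = PySem.List.pyGet? w i).

def stepB (st : List (List String) × Int × List (List Char)) (ch : Char) :
    List (List String) × Int × List (List Char) :=
  let cand := st.2.2.filter (fun w =>
    decide (st.2.1 < PySem.List.len w) && decide (PySem.List.pyGet? w st.2.1 = some ch))
  (st.1 ++ [if cand.isEmpty then ["0"] else cand.map String.ofList], st.2.1 + 1, cand)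

def displayContacts_alt (n : Int) (contact : List String) (s : String) :
    List (List String) :=
  (s.toList.foldl stepB
    ([], 0, pySortedLists (PySem.Set.ofList (contact.map String.toList)))).1

-- ===== PRECONDITION & SPEC =====
def Spec_displayContacts (n : Int) (contact : List String) (s : String) (out : List (List String)) : Prop := out = displayContacts_alt n contact s
instance (n : Int) (contact : List String) (s : String) (out : List (List String)) : Decidable (Spec_displayContacts n contact s out) := by unfold Spec_displayContacts; infer_instance

-- ===== CLAIM (what is proved, stated in full; the proofs are below) =====
def Claim_equal_displayContacts : Prop := ∀ (n : Int) (contact : List String) (s : String), Dom_displayContacts n contact s → Spec_displayContacts n contact s (displayContacts n contact s)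

-- ===== LEMMAS AND PROOFS =====

-- generic: an accumulator-appending fold is init ++ flatMap
theorem foldl_acc_flatMap {α β : Type} (g : List α → β → List α)
    (h : ∀ r k, g r k = r ++ g [] k) :
    ∀ (l : List β) (r : List α), l.foldl g r = r ++ l.flatMap (fun k => g [] k)
  | [], r => by simp
  | k :: l, r => by
    simp only [List.foldl_cons, List.flatMap_cons]
    rw [foldl_acc_flatMap g h l (g r k), h r k, List.append_assoc]

-- strict monotonicity of countP under a pointwise implication with one strict witness
theorem countP_lt_countP {α : Type} (p q : α → Bool) :
    ∀ (l : List α) (x : α), x ∈ l → (∀ a ∈ l, p a = true → q a = true) →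
      q x = true → p x = false → l.countP p < l.countP q
  | [], x, hx, _, _, _ => by cases hx
  | a :: l, x, hx, himp, hq, hp => by
    rcases List.mem_cons.mp hx with rfl | hx'
    · have hle : l.countP p ≤ l.countP q :=
        List.countP_mono_left (fun a ha h => himp a (List.mem_cons_of_mem _ ha) h)
      simp [List.countP_cons, hp, hq]
      omega
    · have hlt := countP_lt_countP p q l x hx'
        (fun a ha h => himp a (List.mem_cons_of_mem _ ha) h) hq hp
      have hha : p a = true → q a = true := himp a (List.mem_cons_self)
      simp only [List.countP_cons]
      by_cases h1 : p a = true
      · simp [h1, hha h1]; omega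
      · simp only [eq_false_of_ne_true h1, if_neg, Bool.false_eq_true, if_false]
        omega

-- the two build invariants: which paths are trie nodes, which end flags are set
def TrieKeys (cs : List (List Char)) (t : PySem.Dict (List Char) Bool) : Prop :=
  ∀ k, k ∈ t.keys ↔ k = [] ∨ ∃ w ∈ cs, k ≠ [] ∧ k <+: w

def TrieFlag (cs : List (List Char)) (t : PySem.Dict (List Char) Bool) : Prop :=
  ∀ k, (t.getD k false = true ↔ k ∈ cs)

theorem trieWalk_snd : ∀ (u : List Char) (t : PySem.Dict (List Char) Bool) (p : List Char),
    (u.foldl trieStep (t, p)).2 = p ++ u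
  | [], _, _ => by simp
  | ch :: u, t, p => by
    simp only [List.foldl_cons, trieStep]
    rw [trieWalk_snd u _ (p ++ [ch])]
    simp

theorem trieWalk_getD : ∀ (u : List Char) (t : PySem.Dict (List Char) Bool) (p k : List Char),
    (u.foldl trieStep (t, p)).1.getD k false = t.getD k false
  | [], _, _, _ => rfl
  | ch :: u, t, p, k => by
    simp only [List.foldl_cons, trieStep]
    rw [trieWalk_getD u _ (p ++ [ch]) k]
    by_cases hc : t.contains (p ++ [ch]) = true
    · simp [hc]
    · simp only [hc, Bool.false_eq_true, if_false]
      rw [PySem.Dict.getD_insert]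
      split
      · next he =>
        subst he
        symm
        exact PySem.Dict.getD_of_not_contains t false (by simpa using hc)
      · rfl

theorem prefix_snoc_step (p k : List Char) (ch : Char) (u : List Char) :
    (p <+: k ∧ k <+: p ++ ch :: u ∧ p.length < k.length) ↔
      (k = p ++ [ch] ∨
        ((p ++ [ch]) <+: k ∧ k <+: (p ++ [ch]) ++ u ∧ (p ++ [ch]).length < k.length)) := by
  have hassoc : (p ++ [ch]) ++ u = p ++ ch :: u := by simp
  constructor
  · rintro ⟨h1, h2, h3⟩
    have ha : (p ++ [ch]) <+: p ++ ch :: u := by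
      rw [← hassoc]; exact List.prefix_append _ _
    have hpc : (p ++ [ch]) <+: k :=
      List.prefix_of_prefix_length_le ha h2 (by simp; omega)
    by_cases he : k.length = p.length + 1
    · exact Or.inl ((hpc.eq_of_length (by simp [he])).symm)
    · refine Or.inr ⟨hpc, by rw [hassoc]; exact h2, ?_⟩
      have := hpc.length_le
      simp at this ⊢
      omega
  · rintro (rfl | ⟨h1, h2, h3⟩)
    · exact ⟨List.prefix_append _ _, by rw [← hassoc]; exact List.prefix_append _ _,
        by simp⟩
    · refine ⟨(List.prefix_append _ _).trans h1, by rw [← hassoc]; exact h2, ?_⟩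
      simp at h3; omega

theorem trieWalk_keys : ∀ (u : List Char) (t : PySem.Dict (List Char) Bool) (p k : List Char),
    (k ∈ (u.foldl trieStep (t, p)).1.keys ↔
      k ∈ t.keys ∨ (p <+: k ∧ k <+: p ++ u ∧ p.length < k.length))
  | [], t, p, k => by
    simp only [List.foldl_nil, List.append_nil]
    constructor
    · exact fun h => Or.inl h
    · rintro (h | ⟨h1, h2, h3⟩)
      · exact h
      · exact absurd h2.length_le (by omega)
  | ch :: u, t, p, k => by
    simp only [List.foldl_cons, trieStep]
    rw [trieWalk_keys u _ (p ++ [ch]) k]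
    have hmem : k ∈ (if t.contains (p ++ [ch]) = true then t
        else t.insert (p ++ [ch]) false).keys ↔ k = p ++ [ch] ∨ k ∈ t.keys := by
      by_cases hc : t.contains (p ++ [ch]) = true
      · simp only [hc, if_true]
        constructor
        · exact fun h => Or.inr h
        · rintro (rfl | h)
          · exact (PySem.Dict.contains_iff_mem_keys t (p ++ [ch])).mp hc
          · exact h
      · simp only [hc, Bool.false_eq_true, if_false]
        rw [PySem.Dict.mem_keys_insert]
    rw [hmem, prefix_snoc_step p k ch u]
    tauto

theorem trieWalk_nodup : ∀ (u : List Char) (t : PySem.Dict (List Char) Bool) (p : List Char),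
    t.keys.Nodup → (u.foldl trieStep (t, p)).1.keys.Nodup
  | [], _, _, h => h
  | ch :: u, t, p, h => by
    simp only [List.foldl_cons, trieStep]
    apply trieWalk_nodup u _ (p ++ [ch])
    by_cases hc : t.contains (p ++ [ch]) = true
    · simpa [hc] using h
    · simp only [hc, Bool.false_eq_true, if_false]
      exact PySem.Dict.nodup_keys_insert t (p ++ [ch]) false h

theorem trieInsert_inv (W : List (List Char)) (t : PySem.Dict (List Char) Bool)
    (w : List Char) (hK : TrieKeys W t) (hF : TrieFlag W t) (hN : t.keys.Nodup) :
    TrieKeys (W ++ [w]) (trieInsert t w) ∧ TrieFlag (W ++ [w]) (trieInsert t w) ∧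
      (trieInsert t w).keys.Nodup := by
  rw [show trieInsert t w = ((w.foldl trieStep (t, [])).1).insert
    ((w.foldl trieStep (t, [])).2) true from rfl, trieWalk_snd w t []]
  simp only [List.nil_append]
  refine ⟨?_, ?_,
    PySem.Dict.nodup_keys_insert ((w.foldl trieStep (t, [])).1) w true
      (trieWalk_nodup w t [] hN)⟩
  · intro k
    rw [PySem.Dict.mem_keys_insert, trieWalk_keys w t [] k, hK k]
    simp only [List.nil_prefix, true_and, List.nil_append, List.length_nil,
      List.mem_append, List.mem_singleton]
    constructor
    · rintro (h | h)
      · rcases eq_or_ne k ([] : List Char) with rfl | hk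
        · exact Or.inl rfl
        · exact Or.inr ⟨w, Or.inr rfl, hk, by simp [h]⟩
      · rcases h with (rfl | ⟨v, hv, hne, hp⟩) | ⟨h1, h2⟩
        · exact Or.inl rfl
        · exact Or.inr ⟨v, Or.inl hv, hne, hp⟩
        · exact Or.inr ⟨w, Or.inr rfl, by rintro rfl; simp at h2, h1⟩
    · rintro (rfl | ⟨v, hv, hne, hp⟩)
      · exact Or.inr (Or.inl (Or.inl rfl))
      · rcases hv with hv | rfl
        · exact Or.inr (Or.inl (Or.inr ⟨v, hv, hne, hp⟩))
        · rcases eq_or_ne k v with rfl | hkv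
          · exact Or.inl rfl
          · have hle := hp.length_le
            have hlen : k.length ≠ v.length := fun he => hkv (hp.eq_of_length he)
            have hk0 : 0 < k.length := by
              rcases Nat.eq_zero_or_pos k.length with h0 | h0
              · exact absurd (List.eq_nil_of_length_eq_zero h0) hne
              · exact h0
            exact Or.inr (Or.inr ⟨hp, hk0⟩)
  · intro k
    rw [PySem.Dict.getD_insert]
    split
    · next he => subst he; simp
    · next he =>
      rw [trieWalk_getD w t [] k, hF k]
      simp [he]

theorem trieBuild_aux : ∀ (cs W : List (List Char)) (t : PySem.Dict (List Char) Bool),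
    TrieKeys W t → TrieFlag W t → t.keys.Nodup →
    TrieKeys (W ++ cs) (cs.foldl trieInsert t) ∧ TrieFlag (W ++ cs) (cs.foldl trieInsert t) ∧
      (cs.foldl trieInsert t).keys.Nodup
  | [], W, t, hK, hF, hN => by simpa using ⟨hK, hF, hN⟩
  | w :: cs, W, t, hK, hF, hN => by
    obtain ⟨hK', hF', hN'⟩ := trieInsert_inv W t w hK hF hN
    have := trieBuild_aux cs (W ++ [w]) (trieInsert t w) hK' hF' hN'
    simpa using this

theorem trieBuild_inv (cs : List (List Char)) :
    TrieKeys cs (trieBuild cs) ∧ TrieFlag cs (trieBuild cs) ∧ (trieBuild cs).keys.Nodup := by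
  have h0K : TrieKeys [] ((PySem.Dict.empty).insert ([] : List Char) false) := by
    intro k
    rw [PySem.Dict.mem_keys_insert]
    simp [PySem.Dict.keys_empty]
  have h0F : TrieFlag [] ((PySem.Dict.empty).insert ([] : List Char) false) := by
    intro k
    rw [PySem.Dict.getD_insert]
    split <;> simp [PySem.Dict.getD_empty]
  have h0N : ((PySem.Dict.empty).insert ([] : List Char) false).keys.Nodup :=
    PySem.Dict.nodup_keys_insert _ ([] : List Char) false (by simp [PySem.Dict.keys_empty])
  simpa using trieBuild_aux cs [] _ h0K h0F h0N

-- ---- collect ----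

theorem mem_childPaths (t : PySem.Dict (List Char) Bool) (p k : List Char) :
    k ∈ childPaths t p ↔ k ∈ t.keys ∧ k.length = p.length + 1 ∧ p <+: k := by
  simp [childPaths, List.mem_filter, List.isPrefixOf_iff_prefix]

theorem childPath_last (p k : List Char) (hl : k.length = p.length + 1) (hp : p <+: k) :
    p ++ [k.getLastD ' '] = k := by
  obtain ⟨r, rfl⟩ := hp
  simp only [List.length_append] at hl
  obtain ⟨c, rfl⟩ := List.length_eq_one_iff.mp (by omega : r.length = 1)
  simp [List.getLastD_concat]

theorem trieCollect_append (t : PySem.Dict (List Char) Bool) :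
    ∀ (fuel : Nat) (p pref : List Char) (res : List (List Char)),
      trieCollect t fuel p pref res = res ++ trieCollect t fuel p pref []
  | 0, p, pref, res => by simp [trieCollect]
  | fuel + 1, p, pref, res => by
    simp only [trieCollect]
    have h : ∀ (r : List (List Char)) (k : List Char),
        trieCollect t fuel k (pref ++ [k.getLastD ' ']) r =
          r ++ trieCollect t fuel k (pref ++ [k.getLastD ' ']) [] :=
      fun r k => trieCollect_append t fuel k _ r
    rw [foldl_acc_flatMap _ h, foldl_acc_flatMap _ h]
    by_cases hf : t.getD p false <;> simp [hf]

theorem trieCollect_eq (t : PySem.Dict (List Char) Bool) (fuel : Nat) (p pref : List Char) :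
    trieCollect t (fuel + 1) p pref [] =
      (if t.getD p false then [pref] else []) ++
        (childPaths t p).flatMap (fun k => trieCollect t fuel k (pref ++ [k.getLastD ' ']) []) := by
  simp only [trieCollect]
  have h : ∀ (r : List (List Char)) (k : List Char),
      trieCollect t fuel k (pref ++ [k.getLastD ' ']) r =
        r ++ trieCollect t fuel k (pref ++ [k.getLastD ' ']) [] :=
    fun r k => trieCollect_append t fuel k _ r
  rw [foldl_acc_flatMap _ h]
  by_cases hf : t.getD p false <;> simp [hf]

theorem childPaths_fuel (t : PySem.Dict (List Char) Bool) (p k : List Char)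
    (hk : k ∈ t.keys) (hl : k.length = p.length + 1) :
    (t.keys.filter (fun x => decide (k.length < x.length))).length <
      (t.keys.filter (fun x => decide (p.length < x.length))).length := by
  rw [← List.countP_eq_length_filter, ← List.countP_eq_length_filter]
  exact countP_lt_countP _ _ t.keys k hk
    (fun a _ h => by simp_all; omega) (by simp [hl]) (by simp)

theorem trieCollect_spec (cs : List (List Char)) (t : PySem.Dict (List Char) Bool)
    (hK : TrieKeys cs t) (hF : TrieFlag cs t) (hN : t.keys.Nodup) :
    ∀ (fuel : Nat) (p : List Char), p ∈ t.keys →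
      (t.keys.filter (fun x => decide (p.length < x.length))).length < fuel →
      ((∀ w, w ∈ trieCollect t fuel p p [] ↔ w ∈ cs ∧ p <+: w) ∧
        (trieCollect t fuel p p []).Nodup) := by
  intro fuel
  induction fuel with
  | zero => intro p _ hb; omega
  | succ fuel IH =>
    intro p hp hb
    have hrw : (childPaths t p).flatMap
        (fun k => trieCollect t fuel k (p ++ [k.getLastD ' ']) []) =
        (childPaths t p).flatMap (fun k => trieCollect t fuel k k []) := by
      apply List.flatMap_congr
      intro k hk
      obtain ⟨_, hl, hpk⟩ := (mem_childPaths t p k).mp hk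
      rw [childPath_last p k hl hpk]
    have heq : trieCollect t (fuel + 1) p p [] =
        (if t.getD p false then [p] else []) ++
          (childPaths t p).flatMap (fun k => trieCollect t fuel k k []) := by
      rw [trieCollect_eq, hrw]
    have hchild : ∀ k ∈ childPaths t p,
        (∀ w, w ∈ trieCollect t fuel k k [] ↔ w ∈ cs ∧ k <+: w) ∧
          (trieCollect t fuel k k []).Nodup := by
      intro k hk
      obtain ⟨hkk, hl, _⟩ := (mem_childPaths t p k).mp hk
      exact IH k hkk (by have := childPaths_fuel t p k hkk hl; omega)
    constructor
    · intro w
      rw [heq]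
      simp only [List.mem_append, List.mem_flatMap]
      constructor
      · rintro (h0 | ⟨k, hk, hw⟩)
        · have hfl : t.getD p false = true := by
            by_cases hf : t.getD p false = true
            · exact hf
            · exact absurd h0 (by simp [hf])
          have hwp : w = p := by simpa [hfl] using h0
          subst hwp
          exact ⟨(hF w).mp hfl, List.prefix_refl _⟩
        · obtain ⟨hw1, hw2⟩ := ((hchild k hk).1 w).mp hw
          obtain ⟨_, _, hpk⟩ := (mem_childPaths t p k).mp hk
          exact ⟨hw1, hpk.trans hw2⟩
      · rintro ⟨hwcs, hpw⟩
        rcases eq_or_ne w p with rfl | hne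
        · have hfl : t.getD w false = true := (hF w).mpr hwcs
          simp [hfl]
        · have hlt : p.length < w.length := by
            have hle := hpw.length_le
            rcases Nat.eq_or_lt_of_le hle with he | h
            · exact absurd (hpw.eq_of_length he).symm hne
            · exact h
          have htp : w.take (p.length + 1) <+: w := List.take_prefix _ _
          have hlen : (w.take (p.length + 1)).length = p.length + 1 := by
            simp [List.length_take]; omega
          have hppfx : p <+: w.take (p.length + 1) := by
            rw [List.prefix_iff_eq_take] at hpw ⊢
            rw [List.take_take]
            simpa using hpw
          have hkmem : w.take (p.length + 1) ∈ childPaths t p := by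
            rw [mem_childPaths]
            refine ⟨?_, hlen, hppfx⟩
            rw [hK]
            exact Or.inr ⟨w, hwcs, fun h => by simp [h] at hlen, htp⟩
          exact Or.inr ⟨_, hkmem, ((hchild _ hkmem).1 w).mpr ⟨hwcs, htp⟩⟩
    · rw [heq, List.nodup_append]
      have hnd : (childPaths t p).Nodup := hN.filter _
      have hflat : ((childPaths t p).flatMap (fun k => trieCollect t fuel k k [])).Nodup := by
        rw [List.flatMap_def, List.nodup_flatten]
        constructor
        · intro l hl
          simp only [List.mem_map] at hl
          obtain ⟨k, hk, rfl⟩ := hl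
          exact (hchild k hk).2
        · rw [List.pairwise_map]
          refine List.Pairwise.imp_of_mem (fun {a b} ha hb hab => ?_) hnd
          intro w hwa hwb
          obtain ⟨_, hla, hpa⟩ := (mem_childPaths t p a).mp ha
          obtain ⟨_, hlb, hpb⟩ := (mem_childPaths t p b).mp hb
          have h1 := ((hchild a ha).1 w).mp hwa
          have h2 := ((hchild b hb).1 w).mp hwb
          have hab' : a <+: b := List.prefix_of_prefix_length_le h1.2 h2.2 (by omega)
          exact hab (hab'.eq_of_length (by omega))
      refine ⟨?_, hflat, ?_⟩
      · by_cases hf : t.getD p false <;> simp [hf]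
      · intro w hw v hv hev
        subst hev
        have hwp : w = p := by
          by_cases hf : t.getD p false = true
          · simpa [hf] using hw
          · exact absurd hw (by simp [hf])
        subst hwp
        obtain ⟨k, hk, hwk⟩ := List.mem_flatMap.mp hv
        obtain ⟨_, hl, _⟩ := (mem_childPaths t _ k).mp hk
        have := (((hchild k hk).1 _).mp hwk).2.length_le
        omega

-- ---- sorted wrappers ----

theorem mem_pySortedLists (xs : List (List Char)) (x : List Char) :
    x ∈ pySortedLists xs ↔ x ∈ xs := by
  unfold pySortedLists
  exact @PySem.List.mem_sorted (List Char) (List Char) List.instLinearOrder.toLT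
    LinearOrder.toDecidableLT xs (fun x => x) false x

theorem perm_pySortedLists (xs : List (List Char)) : (pySortedLists xs).Perm xs := by
  unfold pySortedLists
  exact @PySem.List.sorted_perm (List Char) (List Char) List.instLinearOrder.toLT
    LinearOrder.toDecidableLT xs (fun x => x) false

theorem pairwise_pySortedLists (xs : List (List Char)) :
    (pySortedLists (PySem.Set.ofList xs)).Pairwise (· < ·) := by
  unfold pySortedLists
  exact PySem.List.sorted_ofList_pairwise_lt xs

theorem pySortedLists_eq_of_perm (xs ys : List (List Char)) (hp : ys.Perm xs)
    (hs : ys.Pairwise (· < ·)) : pySortedLists xs = ys := by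
  unfold pySortedLists
  exact PySem.List.sorted_eq_of_perm_of_pairwise_lt xs ys (fun x => x) hp hs

-- ---- main loop ----

theorem collect_sorted_eq (cs : List (List Char)) (t : PySem.Dict (List Char) Bool)
    (hK : TrieKeys cs t) (hF : TrieFlag cs t) (hN : t.keys.Nodup)
    (fuel : Nat) (p : List Char) (hp : p ∈ t.keys)
    (hb : (t.keys.filter (fun x => decide (p.length < x.length))).length < fuel) :
    pySortedLists (trieCollect t fuel p p []) =
      (pySortedLists (PySem.Set.ofList cs)).filter (fun w => p.isPrefixOf w) := by
  obtain ⟨hmem, hnd⟩ := trieCollect_spec cs t hK hF hN fuel p hp hb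
  have huniqnd : (pySortedLists (PySem.Set.ofList cs)).Nodup :=
    (perm_pySortedLists _).nodup_iff.mpr (PySem.Set.nodup_ofList cs)
  apply pySortedLists_eq_of_perm
  · rw [List.perm_ext_iff_of_nodup (huniqnd.filter _) hnd]
    intro w
    rw [List.mem_filter, mem_pySortedLists, PySem.Set.mem_ofList, hmem w,
      List.isPrefixOf_iff_prefix]
  · exact (pairwise_pySortedLists cs).filter _

theorem loopDead (t : PySem.Dict (List Char) Bool) (fuel : Nat) :
    ∀ (l : List Char) (ans : List (List String)) (pref : List Char) (i : Int),
      (l.foldl (stepA t fuel) (ans, pref, none)).1 =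
        (l.foldl stepB (ans, i, [])).1
  | [], ans, pref, i => rfl
  | ch :: l, ans, pref, i => by
    simp only [List.foldl_cons]
    have hA : stepA t fuel (ans, pref, none) ch = (ans ++ [["0"]], pref ++ [ch], none) := rfl
    have hB : stepB (ans, i, []) ch = (ans ++ [["0"]], i + 1, []) := rfl
    rw [hA, hB]
    exact loopDead t fuel l (ans ++ [["0"]]) (pref ++ [ch]) (i + 1)

-- on a list of words that all extend p, the Source B character test at position |p|
-- is exactly "starts with p ++ [ch]"
theorem filter_char_eq (l : List (List Char)) (p : List Char) (ch : Char)
    (hall : ∀ w ∈ l, p <+: w) :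
    l.filter (fun w => decide ((p.length : Int) < PySem.List.len w) &&
        decide (PySem.List.pyGet? w (p.length : Int) = some ch)) =
      l.filter (fun w => (p ++ [ch]).isPrefixOf w) := by
  apply List.filter_congr
  intro w hw
  obtain ⟨r, rfl⟩ := hall w hw
  cases r with
  | nil =>
    have h1 : ¬ ((p ++ [ch]) <+: p) := fun h => absurd h.length_le (by simp)
    have hR : (p ++ [ch]).isPrefixOf p = false :=
      Bool.eq_false_iff.mpr (fun h => h1 (List.isPrefixOf_iff_prefix.mp h))
    simp [PySem.List.len_eq, hR]
  | cons c r' =>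
    have hget : PySem.List.pyGet? (p ++ c :: r') ((p.length : Int)) = some c := by
      exact PySem.List.pyGet?_append_length ..
    have hlen : ((p.length : Int) < PySem.List.len (p ++ c :: r')) := by
      simp [PySem.List.len_eq]
    have hpfx : ((p ++ [ch]) <+: p ++ c :: r') ↔ ch = c ∧ True := by
      rw [List.prefix_append_right_inj, List.cons_prefix_cons]
      simp
    by_cases hc : c = ch
    · subst hc
      simp [hget, hlen, List.isPrefixOf_iff_prefix, hpfx]
    · have hc' : ¬ (ch = c) := fun h => hc h.symm
      have hR : (p ++ [ch]).isPrefixOf (p ++ c :: r') = false :=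
        Bool.eq_false_iff.mpr (fun h => hc' ((hpfx.mp (List.isPrefixOf_iff_prefix.mp h)).1))
      simp [hget, hR, hc, hc']

theorem filter_prefix_filter (l : List (List Char)) (p : List Char) (ch : Char) :
    (l.filter (fun w => p.isPrefixOf w)).filter (fun w => (p ++ [ch]).isPrefixOf w) =
      l.filter (fun w => (p ++ [ch]).isPrefixOf w) := by
  induction l with
  | nil => rfl
  | cons a l ih =>
    by_cases h : (p ++ [ch]).isPrefixOf a = true
    · have hp : p.isPrefixOf a = true := by
        rw [List.isPrefixOf_iff_prefix] at h ⊢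
        exact (List.prefix_append _ _).trans h
      simp [List.filter_cons, h, hp, ih]
    · by_cases hp : p.isPrefixOf a = true <;> simp [List.filter_cons, h, hp, ih]

theorem loopAlive (cs : List (List Char)) (hK : TrieKeys cs (trieBuild cs))
    (hF : TrieFlag cs (trieBuild cs)) (hN : (trieBuild cs).keys.Nodup) :
    ∀ (l : List Char) (ans : List (List String)) (pref : List Char),
      (pref = [] ∨ pref ∈ (trieBuild cs).keys) →
      (l.foldl (stepA (trieBuild cs) ((trieBuild cs).size + 1)) (ans, pref, some pref)).1 =
        (l.foldl stepB (ans, (pref.length : Int),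
          (pySortedLists (PySem.Set.ofList cs)).filter (fun w => pref.isPrefixOf w))).1
  | [], ans, pref, _ => rfl
  | ch :: l, ans, pref, halive => by
    simp only [List.foldl_cons]
    have hnarrow : ((pySortedLists (PySem.Set.ofList cs)).filter
        (fun w => pref.isPrefixOf w)).filter (fun w =>
          decide ((pref.length : Int) < PySem.List.len w) &&
          decide (PySem.List.pyGet? w (pref.length : Int) = some ch)) =
        (pySortedLists (PySem.Set.ofList cs)).filter
          (fun w => (pref ++ [ch]).isPrefixOf w) := by
      rw [filter_char_eq _ pref ch (fun w hw => by
        have := (List.mem_filter.mp hw).2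
        rwa [List.isPrefixOf_iff_prefix] at this)]
      exact filter_prefix_filter _ pref ch
    have hstepB : stepB (ans, (pref.length : Int),
        (pySortedLists (PySem.Set.ofList cs)).filter (fun w => pref.isPrefixOf w)) ch =
        (ans ++ [if ((pySortedLists (PySem.Set.ofList cs)).filter
            (fun w => (pref ++ [ch]).isPrefixOf w)).isEmpty then ["0"]
          else ((pySortedLists (PySem.Set.ofList cs)).filter
            (fun w => (pref ++ [ch]).isPrefixOf w)).map String.ofList],
          ((pref ++ [ch]).length : Int),
          (pySortedLists (PySem.Set.ofList cs)).filter
            (fun w => (pref ++ [ch]).isPrefixOf w)) := by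
      simp only [stepB, hnarrow]
      simp
    by_cases hc : (pref ++ [ch]) ∈ (trieBuild cs).keys
    · have hcont : (trieBuild cs).contains (pref ++ [ch]) = true :=
        (PySem.Dict.contains_iff_mem_keys (trieBuild cs) (pref ++ [ch])).mpr hc
      have hb : ((trieBuild cs).keys.filter
          (fun x => decide ((pref ++ [ch]).length < x.length))).length <
          (trieBuild cs).size + 1 := by
        have h1 : ((trieBuild cs).keys.filter
            (fun x => decide ((pref ++ [ch]).length < x.length))).length ≤
            (trieBuild cs).keys.length := List.length_filter_le _ _
        have h2 : (trieBuild cs).size = (trieBuild cs).keys.length := by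
          simp [PySem.Dict.size, PySem.Dict.keys]
        omega
      have hsorted := collect_sorted_eq cs (trieBuild cs) hK hF hN
        ((trieBuild cs).size + 1) (pref ++ [ch]) hc hb
      have hnonempty : ((pySortedLists (PySem.Set.ofList cs)).filter
          (fun w => (pref ++ [ch]).isPrefixOf w)) ≠ [] := by
        rw [Ne, List.filter_eq_nil_iff]
        intro hall
        rcases (hK _).mp hc with he | ⟨w, hw, _, hpw⟩
        · simp at he
        · exact hall w (by rw [mem_pySortedLists, PySem.Set.mem_ofList]; exact hw)
            (by simp [List.isPrefixOf_iff_prefix, hpw])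
      have hA : stepA (trieBuild cs) ((trieBuild cs).size + 1) (ans, pref, some pref) ch =
          (ans ++ [((pySortedLists (PySem.Set.ofList cs)).filter
            (fun w => (pref ++ [ch]).isPrefixOf w)).map String.ofList], pref ++ [ch],
            some (pref ++ [ch])) := by
        simp only [stepA, hcont, if_true, hsorted]
      rw [hA, hstepB, if_neg (by simpa [List.isEmpty_iff] using hnonempty)]
      exact loopAlive cs hK hF hN l _ (pref ++ [ch]) (Or.inr hc)
    · have hcont : (trieBuild cs).contains (pref ++ [ch]) = false := by
        rcases h : (trieBuild cs).contains (pref ++ [ch]) with _ | _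
        · rfl
        · exact absurd ((PySem.Dict.contains_iff_mem_keys (trieBuild cs) (pref ++ [ch])).mp h) hc
      have hdead : ∀ w ∈ cs, ¬ (pref ++ [ch]) <+: w := by
        intro w hw hp
        exact hc ((hK _).mpr (Or.inr ⟨w, hw, by simp, hp⟩))
      have hms : (pySortedLists (PySem.Set.ofList cs)).filter
          (fun w => (pref ++ [ch]).isPrefixOf w) = [] := by
        rw [List.filter_eq_nil_iff]
        intro w hw
        rw [mem_pySortedLists, PySem.Set.mem_ofList] at hw
        simp only [List.isPrefixOf_iff_prefix, decide_eq_true_eq]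
        exact hdead w hw
      have hA : stepA (trieBuild cs) ((trieBuild cs).size + 1) (ans, pref, some pref) ch =
          (ans ++ [["0"]], pref ++ [ch], none) := by
        simp only [stepA, hcont]
        rfl
      rw [hA, hstepB, hms]
      simp only [List.isEmpty_nil, if_true]
      exact loopDead (trieBuild cs) ((trieBuild cs).size + 1) l _ (pref ++ [ch])
        (((pref ++ [ch]).length : Int))

-- ===== VERDICT (by name: the statement is the Claim_ definition above) =====
theorem displayContacts_spec : Claim_equal_displayContacts := by
  intro n contact s _
  unfold Spec_displayContacts displayContacts displayContacts_alt
  obtain ⟨hK, hF, hN⟩ := trieBuild_inv (contact.map String.toList)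
  have h := loopAlive (contact.map String.toList) hK hF hN s.toList [] [] (Or.inl rfl)
  simpa [List.filter_eq_self] using h
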